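-- pv_equiv track=rewrite | github.com/treenoder/ALGLB | LB2/B/main.py | solution
-- ===== SOURCE A (Python) =====
-- def solution(p: list[int], q: list[tuple[int, int, int]]) -> str:
--     """
--     Визначає, чи існує місто в заданому діапазоні, яке перевезло точно вказану кількість людей.
--
--     Параметри:
--     p: Список цілих чисел, де кожне число представляє кількість людей, перевезених трамваями в місті.
--     q: Список запитів, де кожен запит - це кортеж (l, r, x)
--         l: Початковий індекс діапазону (1-базовий індекс).
--         r: Кінцевий індекс діапазону (1-базовий індекс).
--         x: Кількість людей, яку потрібно перевірити в заданому діапазоні.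
--
--     Часова складність:
--     O(n + k log m), де n - довжина списку p, k - кількість запитів, m - середня кількість індексів для значення x.
--
--     Просторова складність:
--     O(n + k), де n - довжина списку p, k - кількість запитів.
--
--     Повертає:
--     Рядок, де кожен символ '1', якщо існує місто в заданому діапазоні [l, r], яке перевезло точно x людей, і '0' в іншому випадку.
--     """
--
--     # Створюємо словник для зберігання індексів міст за кількістю перевезених людей
--     passengers_indices = {}
--     for idx, count in enumerate(p):
--         if count not in passengers_indices:
--             passengers_indices[count] = []
--         # Додаємо індекс (1-базований) до списку індексів для цієї кількості
--         passengers_indices[count].append(idx + 1)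
--
--     # Бінарний пошук індексу у визначеному діапазоні
--     def binary_search(indices, low, high):
--         left, right = 0, len(indices) - 1
--         while left <= right:
--             mid = left + (right - left) // 2
--             # Перевіряємо, чи знаходиться індекс у діапазоні [low, high]
--             if low <= indices[mid] <= high:
--                 return True
--             elif indices[mid] < low:
--                 left = mid + 1
--             else:
--                 right = mid - 1
--         return False
--
--     results = []
--     for l, r, x in q:
--         # Якщо x немає у словнику, додаємо '0' до результатів
--         if x not in passengers_indices:
--             results.append('0')
--         else:
--             indices = passengers_indices[x]
--             # Перевіряємо, чи існує індекс у заданому діапазоні [l, r]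
--             if binary_search(indices, l, r):
--                 results.append('1')
--             else:
--                 results.append('0')
--
--     return ''.join(results)
-- ===== SOURCE B (Python) =====
-- def solution(p: list[int], q: list[tuple[int, int, int]]) -> str:
--     # Naive re-implementation: for each query scan p with 1-based positions.
--     return ''.join(
--         '1' if any(l <= i + 1 <= r and c == x for i, c in enumerate(p)) else '0'
--         for (l, r, x) in q
--     )
-- ===== Notes on version B (the rewrite author's own statement) =====
-- stated objective: simpler
-- what changed: Drops A's value->indices dictionary and hand-written binary search entirely; B answers each query by a direct linear scan of p with 1-based positions and joins the per-query '0'/'1' characters.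
import Mathlib
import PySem

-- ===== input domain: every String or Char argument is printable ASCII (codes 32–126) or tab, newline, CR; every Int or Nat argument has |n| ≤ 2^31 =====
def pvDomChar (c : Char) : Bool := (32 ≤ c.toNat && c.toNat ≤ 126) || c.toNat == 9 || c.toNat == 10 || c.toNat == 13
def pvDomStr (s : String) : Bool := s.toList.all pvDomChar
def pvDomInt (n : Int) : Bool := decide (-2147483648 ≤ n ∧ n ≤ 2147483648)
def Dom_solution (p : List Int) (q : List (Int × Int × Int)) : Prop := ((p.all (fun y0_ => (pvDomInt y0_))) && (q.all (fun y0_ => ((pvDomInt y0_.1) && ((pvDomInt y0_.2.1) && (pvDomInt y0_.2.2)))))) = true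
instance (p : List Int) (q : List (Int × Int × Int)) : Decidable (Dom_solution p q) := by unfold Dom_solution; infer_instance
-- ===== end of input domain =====

-- B drops A's value->indices dictionary and binary search: each query is answered by a
-- direct linear scan of p with 1-based positions (simpler; not faster).


-- ===== PORT A =====
-- A's inner `binary_search` while-loop (left/right pointers); the `none` branch of
-- pyGet? only makes the recursion total — on A's calls mid is always in range.
def bsGo (indices : List Int) (low high left right : Int) : Bool :=
  if _h : left ≤ right then
    let mid := left + PySem.Int.floordiv (right - left) 2
    match PySem.List.pyGet? indices mid with
    | none => false
    | some v =>
      if low ≤ v ∧ v ≤ high then true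
      else if v < low then bsGo indices low high (mid + 1) right
      else bsGo indices low high left (mid - 1)
  else false
termination_by (right + 1 - left).toNat
decreasing_by
  · have := PySem.Int.floordiv_eq_ediv_of_pos (a := right - left) (by norm_num : (0:Int) < 2)
    omega
  · have := PySem.Int.floordiv_eq_ediv_of_pos (a := right - left) (by norm_num : (0:Int) < 2)
    omega

-- A's `binary_search(indices, low, high)`
def binarySearch (indices : List Int) (low high : Int) : Bool :=
  bsGo indices low high 0 ((indices.length : Int) - 1)

def solution (p : List Int) (q : List (Int × Int × Int)) : String :=
  let passengersIndices : PySem.Dict Int (List Int) :=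
    (PySem.List.enumerate p).foldl
      (fun d ic =>
        let d1 := if d.contains ic.2 = false then d.insert ic.2 ([] : List Int) else d
        d1.modify ic.2 [] (fun xs => xs ++ [ic.1 + 1]))
      PySem.Dict.empty
  let results : List String :=
    q.foldl
      (fun res t =>
        if passengersIndices.contains t.2.2 = false then res ++ ["0"]
        else
          let indices := passengersIndices.getD t.2.2 []
          if binarySearch indices t.1 t.2.1 then res ++ ["1"] else res ++ ["0"])
      []
  PySem.Str.join "" results

-- ===== PORT B =====
def solution_alt (p : List Int) (q : List (Int × Int × Int)) : String :=
  PySem.Str.join ""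
    (q.map (fun t =>
      if (PySem.List.enumerate p).any
          (fun ic => decide (t.1 ≤ ic.1 + 1) && decide (ic.1 + 1 ≤ t.2.1) && (ic.2 == t.2.2))
      then "1" else "0"))

-- ===== PRECONDITION & SPEC =====
def Spec_solution (p : List Int) (q : List (Int × Int × Int)) (out : String) : Prop := out = solution_alt p q
instance (p : List Int) (q : List (Int × Int × Int)) (out : String) : Decidable (Spec_solution p q out) := by unfold Spec_solution; infer_instance

-- ===== CLAIM (what is proved, stated in full; the proofs are below) =====
def Claim_equal_solution : Prop := ∀ (p : List Int) (q : List (Int × Int × Int)), Dom_solution p q → Spec_solution p q (solution p q)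

-- ===== LEMMAS AND PROOFS =====

-- the 1-based positions of value x in p, in order (what A's dict stores under key x)
def posList (p : List Int) (x : Int) : List Int :=
  ((PySem.List.enumerate p).filter (fun ic => ic.2 == x)).map (fun ic => ic.1 + 1)

lemma build_contains (l : List (Int × Int)) (x : Int) :
    ∀ d : PySem.Dict Int (List Int),
    (l.foldl (fun d ic =>
        let d1 := if d.contains ic.2 = false then d.insert ic.2 ([] : List Int) else d
        d1.modify ic.2 [] (fun xs => xs ++ [ic.1 + 1])) d).contains x
      = (d.contains x || l.any (fun ic => ic.2 == x)) := by
  induction l with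
  | nil => simp
  | cons hd tl ih =>
    intro d
    simp only [List.foldl_cons, List.any_cons, ih]
    by_cases hxc : x = hd.2
    · simp [PySem.Dict.contains_modify, hxc]
    · have h1 : (x == hd.2) = false := by simp [hxc]
      have h2 : (hd.2 == x) = false := by simp [Ne.symm hxc]
      split_ifs with hcont <;>
        simp [PySem.Dict.contains_modify, PySem.Dict.contains_insert, h1, h2]

lemma build_getD (l : List (Int × Int)) (x : Int) :
    ∀ d : PySem.Dict Int (List Int),
    (l.foldl (fun d ic =>
        let d1 := if d.contains ic.2 = false then d.insert ic.2 ([] : List Int) else d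
        d1.modify ic.2 [] (fun xs => xs ++ [ic.1 + 1])) d).getD x []
      = d.getD x [] ++ (l.filter (fun ic => ic.2 == x)).map (fun ic => ic.1 + 1) := by
  induction l with
  | nil => simp
  | cons hd tl ih =>
    intro d
    simp only [List.foldl_cons, ih]
    have hstep :
        ((if d.contains hd.2 = false then d.insert hd.2 ([] : List Int) else d).modify hd.2 []
            (fun xs => xs ++ [hd.1 + 1])).getD x []
          = d.getD x [] ++ (if hd.2 == x then [hd.1 + 1] else []) := by
      by_cases hx : x = hd.2
      · subst hx
        by_cases hc : d.contains hd.2 = false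
        · rw [if_pos hc]
          simp [PySem.Dict.getD_of_not_contains _ _ hc]
        · rw [if_neg hc]
          simp
      · have hbx : (hd.2 == x) = false := by simp [Ne.symm hx]
        by_cases hc : d.contains hd.2 = false
        · rw [if_pos hc]
          simp [PySem.Dict.getD_modify, PySem.Dict.getD_insert, hx, hbx]
        · rw [if_neg hc]
          simp [PySem.Dict.getD_modify, hx, hbx]
    rw [hstep]
    by_cases hc : hd.2 = x <;> simp [hc, List.append_assoc]

lemma posList_sorted (p : List Int) (x : Int) : (posList p x).Pairwise (· < ·) := by
  refine List.Pairwise.map _ (fun a b h => by omega)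
    (List.Pairwise.filter _ (PySem.List.pairwise_lt_enumerate p 0))

lemma mem_posList (p : List Int) (x v : Int) :
    v ∈ posList p x ↔ ∃ ic ∈ PySem.List.enumerate p, ic.2 = x ∧ v = ic.1 + 1 := by
  constructor
  · intro hv
    rcases List.mem_map.mp hv with ⟨ic, hmem, rfl⟩
    rcases List.mem_filter.mp hmem with ⟨h1, h2⟩
    exact ⟨ic, h1, by simpa using h2, rfl⟩
  · rintro ⟨ic, hmem, hx, rfl⟩
    exact List.mem_map.mpr ⟨ic, List.mem_filter.mpr ⟨hmem, by simpa using hx⟩, rfl⟩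

lemma bs_sound_aux (indices : List Int) (low high : Int) :
    ∀ (n : Nat) (left right : Int), (right + 1 - left).toNat ≤ n →
    bsGo indices low high left right = true → ∃ v ∈ indices, low ≤ v ∧ v ≤ high := by
  intro n
  induction n with
  | zero =>
    intro left right hn h
    rw [bsGo] at h
    split_ifs at h with hlr
    omega
  | succ n ih =>
    intro left right hn h
    rw [bsGo] at h
    split_ifs at h with hlr
    have hfd := PySem.Int.floordiv_eq_ediv_of_pos (a := right - left) (by norm_num : (0:Int) < 2)
    cases hget : PySem.List.pyGet? indices (left + PySem.Int.floordiv (right - left) 2) with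
    | none =>
      simp only [hget] at h
      exact absurd h (by simp)
    | some v =>
      simp only [hget] at h
      split_ifs at h with h1 h2
      · exact ⟨v, PySem.List.mem_of_pyGet?_eq_some indices hget, h1⟩
      · exact ih _ _ (by omega) h
      · exact ih _ _ (by omega) h

lemma bs_sound (indices : List Int) (low high left right : Int)
    (h : bsGo indices low high left right = true) :
    ∃ v ∈ indices, low ≤ v ∧ v ≤ high :=
  bs_sound_aux indices low high (right + 1 - left).toNat left right le_rfl h

lemma bs_complete (indices : List Int) (hs : indices.Pairwise (· < ·)) (low high : Int) :
    ∀ (n : Nat) (left right : Int), (right + 1 - left).toNat ≤ n →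
    0 ≤ left → right ≤ (indices.length : Int) - 1 →
    (∃ (j : Nat) (hj : j < indices.length),
        left ≤ (j : Int) ∧ (j : Int) ≤ right ∧ low ≤ indices[j] ∧ indices[j] ≤ high) →
    bsGo indices low high left right = true := by
  intro n
  induction n with
  | zero =>
    rintro left right hn _ _ ⟨j, hj, h1, h2, _⟩
    omega
  | succ n ih =>
    rintro left right hn hl hr ⟨j, hj, hjl, hjr, hjlow, hjhigh⟩
    have hlr : left ≤ right := by omega
    have hfd := PySem.Int.floordiv_eq_ediv_of_pos (a := right - left) (by norm_num : (0:Int) < 2)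
    obtain ⟨m, hm⟩ : ∃ m : Nat, (m : Int) = left + PySem.Int.floordiv (right - left) 2 :=
      ⟨(left + PySem.Int.floordiv (right - left) 2).toNat, by omega⟩
    have hml : m < indices.length := by omega
    rw [bsGo, dif_pos hlr, ← hm]
    simp only [PySem.List.pyGet?_ofNat indices m hml]
    have hmono := List.pairwise_iff_getElem.mp hs
    by_cases hin : low ≤ indices[m] ∧ indices[m] ≤ high
    · simp [hin]
    · rw [if_neg hin]
      by_cases hlt : indices[m] < low
      · rw [if_pos hlt]
        have hjgt : m < j := by
          by_contra hle
          have hle' : j ≤ m := by omega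
          rcases Nat.eq_or_lt_of_le hle' with hcase | hcase
          · subst hcase; omega
          · have := hmono j m hj hml hcase; omega
        exact ih ((m : Int) + 1) right (by omega) (by omega) hr
          ⟨j, hj, by omega, hjr, hjlow, hjhigh⟩
      · rw [if_neg hlt]
        have hjlt : j < m := by
          by_contra hle
          have hle' : m ≤ j := by omega
          rcases Nat.eq_or_lt_of_le hle' with hcase | hcase
          · subst hcase; omega
          · have := hmono m j hml hj hcase; omega
        exact ih left ((m : Int) - 1) (by omega) hl (by omega)
          ⟨j, hj, hjl, by omega, hjlow, hjhigh⟩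

lemma binarySearch_iff (indices : List Int) (hs : indices.Pairwise (· < ·)) (low high : Int) :
    binarySearch indices low high = true ↔ ∃ v ∈ indices, low ≤ v ∧ v ≤ high := by
  constructor
  · exact bs_sound indices low high 0 _
  · rintro ⟨v, hv, h1, h2⟩
    rcases List.mem_iff_getElem.mp hv with ⟨j, hj, rfl⟩
    exact bs_complete indices hs low high (indices.length) 0 ((indices.length : Int) - 1)
      (by omega) (by omega) (by omega) ⟨j, hj, by omega, by omega, h1, h2⟩

lemma foldl_emit {α β : Type} (body : List β → α → List β) (g : α → β)
    (hbody : ∀ res t, body res t = res ++ [g t]) :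
    ∀ (l : List α) (acc : List β), l.foldl body acc = acc ++ l.map g := by
  intro l
  induction l with
  | nil => simp
  | cons hd tl ih => intro acc; simp [hbody, ih]

lemma per_query (p : List Int) (t : Int × Int × Int) :
    (let d := (PySem.List.enumerate p).foldl
        (fun d ic =>
          let d1 := if d.contains ic.2 = false then d.insert ic.2 ([] : List Int) else d
          d1.modify ic.2 [] (fun xs => xs ++ [ic.1 + 1])) PySem.Dict.empty
     if d.contains t.2.2 = false then "0"
     else if binarySearch (d.getD t.2.2 []) t.1 t.2.1 then "1" else "0")
    = (if (PySem.List.enumerate p).any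
          (fun ic => decide (t.1 ≤ ic.1 + 1) && decide (ic.1 + 1 ≤ t.2.1) && (ic.2 == t.2.2))
       then "1" else "0") := by
  simp only []
  have hany : ((PySem.List.enumerate p).any
      (fun ic => decide (t.1 ≤ ic.1 + 1) && decide (ic.1 + 1 ≤ t.2.1) && (ic.2 == t.2.2)) = true)
      ↔ ∃ v ∈ posList p t.2.2, t.1 ≤ v ∧ v ≤ t.2.1 := by
    simp only [List.any_eq_true, Bool.and_eq_true, decide_eq_true_eq, beq_iff_eq]
    constructor
    · rintro ⟨ic, hmem, ⟨h1, h2⟩, h3⟩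
      exact ⟨ic.1 + 1, (mem_posList p t.2.2 _).mpr ⟨ic, hmem, h3, rfl⟩, h1, h2⟩
    · rintro ⟨v, hv, h1, h2⟩
      rcases (mem_posList p t.2.2 v).mp hv with ⟨ic, hmem, hx, rfl⟩
      exact ⟨ic, hmem, ⟨h1, h2⟩, hx⟩
  by_cases hc : ((PySem.List.enumerate p).foldl
      (fun d ic =>
        let d1 := if d.contains ic.2 = false then d.insert ic.2 ([] : List Int) else d
        d1.modify ic.2 [] (fun xs => xs ++ [ic.1 + 1])) PySem.Dict.empty).contains t.2.2
  · rw [if_neg (by simp [hc])]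
    have hgetD := build_getD (PySem.List.enumerate p) t.2.2 PySem.Dict.empty
    rw [PySem.Dict.getD_empty] at hgetD
    have hind : ((PySem.List.enumerate p).foldl
        (fun d ic =>
          let d1 := if d.contains ic.2 = false then d.insert ic.2 ([] : List Int) else d
          d1.modify ic.2 [] (fun xs => xs ++ [ic.1 + 1])) PySem.Dict.empty).getD t.2.2 []
        = posList p t.2.2 := by simpa [posList] using hgetD
    rw [hind]
    have hbs := binarySearch_iff (posList p t.2.2) (posList_sorted p t.2.2) t.1 t.2.1
    by_cases hb : binarySearch (posList p t.2.2) t.1 t.2.1 = true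
    · rw [if_pos hb, if_pos (hany.mpr (hbs.mp hb))]
    · rw [if_neg hb]
      have hnoany : ¬ ((PySem.List.enumerate p).any
          (fun ic => decide (t.1 ≤ ic.1 + 1) && decide (ic.1 + 1 ≤ t.2.1) && (ic.2 == t.2.2)) = true) :=
        fun h => hb (hbs.mpr (hany.mp h))
      rw [if_neg hnoany]
  · have hc' : ((PySem.List.enumerate p).foldl
        (fun d ic =>
          let d1 := if d.contains ic.2 = false then d.insert ic.2 ([] : List Int) else d
          d1.modify ic.2 [] (fun xs => xs ++ [ic.1 + 1])) PySem.Dict.empty).contains t.2.2 = false := by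
      simpa using hc
    rw [if_pos hc']
    have hnc : ∀ ic ∈ PySem.List.enumerate p, ¬ (ic.2 = t.2.2) := by
      have hcont := build_contains (PySem.List.enumerate p) t.2.2 PySem.Dict.empty
      rw [PySem.Dict.contains_empty] at hcont
      simp only [Bool.false_or] at hcont
      intro ic hmem hx
      rw [hcont] at hc'
      have : (PySem.List.enumerate p).any (fun ic => ic.2 == t.2.2) = true :=
        List.any_eq_true.mpr ⟨ic, hmem, by simp [hx]⟩
      simp [this] at hc'
    have hnoany : ¬ ((PySem.List.enumerate p).any
        (fun ic => decide (t.1 ≤ ic.1 + 1) && decide (ic.1 + 1 ≤ t.2.1) && (ic.2 == t.2.2)) = true) := by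
      intro h
      rcases List.any_eq_true.mp h with ⟨ic, hmem, hh⟩
      simp only [Bool.and_eq_true, beq_iff_eq] at hh
      exact hnc ic hmem hh.2
    rw [if_neg hnoany]

lemma solution_eq (p : List Int) (q : List (Int × Int × Int)) :
    solution p q = solution_alt p q := by
  unfold solution solution_alt
  simp only []
  rw [foldl_emit _
      (fun t =>
        let d := (PySem.List.enumerate p).foldl
          (fun d ic =>
            let d1 := if d.contains ic.2 = false then d.insert ic.2 ([] : List Int) else d
            d1.modify ic.2 [] (fun xs => xs ++ [ic.1 + 1])) PySem.Dict.empty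
        if d.contains t.2.2 = false then "0"
        else if binarySearch (d.getD t.2.2 []) t.1 t.2.1 then "1" else "0")
      (by intro res t; simp only []; split_ifs <;> rfl)]
  simp only [List.nil_append]
  congr 1
  exact List.map_congr_left (fun t _ => per_query p t)

-- ===== VERDICT (by name: the statement is the Claim_ definition above) =====
theorem solution_spec : Claim_equal_solution := by
  intro p q _
  unfold Spec_solution
  exact solution_eq p q
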